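-- pv_equiv track=rewrite | github.com/mentalcrash/mc-coin-bot | tests/regime/test_hysteresis_parity.py | _run_incremental_hysteresis
-- ===== SOURCE A (Python) =====
-- def _run_incremental_hysteresis(
--     raw_labels: list[str],
--     min_hold_bars: int,
-- ) -> list[str]:
--     """EDA update()의 hysteresis 로직을 단독 재현."""
--     if min_hold_bars <= 1:
--         return list(raw_labels)
--
--     result: list[str] = []
--     current_label = raw_labels[0]
--     pending_label: str | None = None
--     pending_count = 0
--
--     result.append(current_label)
--
--     for i in range(1, len(raw_labels)):
--         raw = raw_labels[i]
--         if raw == current_label: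
--             pending_label = None
--             pending_count = 0
--             result.append(current_label)
--         elif raw == pending_label:
--             pending_count += 1
--             if pending_count >= min_hold_bars:
--                 current_label = raw
--                 pending_label = None
--                 pending_count = 0
--                 result.append(current_label)
--             else:
--                 result.append(current_label)
--         else:
--             pending_label = raw
--             pending_count = 1
--             result.append(current_label)
--
--     return result
-- ===== SOURCE B (Python) =====
-- def _run_incremental_hysteresis(
--     raw_labels: list[str],
--     min_hold_bars: int,
-- ) -> list[str]:
--     """Run-based hysteresis: process maximal runs of equal labels at once."""
--     if min_hold_bars <= 1:
--         return list(raw_labels)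
--
--     result: list[str] = []
--     current = raw_labels[0]
--     n = len(raw_labels)
--     i = 0
--     while i < n:
--         v = raw_labels[i]
--         j = i
--         while j < n and raw_labels[j] == v:
--             j += 1
--         run_len = j - i
--         if v == current:
--             result.extend([v] * run_len)
--         elif run_len >= min_hold_bars:
--             result.extend([current] * (min_hold_bars - 1))
--             result.extend([v] * (run_len - min_hold_bars + 1))
--             current = v
--         else:
--             result.extend([current] * run_len)
--         i = j
--     return result
-- ===== Notes on version B (the rewrite author's own statement) =====
-- stated objective: alternative
-- what changed: B replaces A's per-element state machine (current/pending/pending_count updated each bar) with a run-based scan: it jumps over each maximal run of equal labels and emits the whole run's output in one step from the run length and min_hold_bars.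
import Mathlib
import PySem

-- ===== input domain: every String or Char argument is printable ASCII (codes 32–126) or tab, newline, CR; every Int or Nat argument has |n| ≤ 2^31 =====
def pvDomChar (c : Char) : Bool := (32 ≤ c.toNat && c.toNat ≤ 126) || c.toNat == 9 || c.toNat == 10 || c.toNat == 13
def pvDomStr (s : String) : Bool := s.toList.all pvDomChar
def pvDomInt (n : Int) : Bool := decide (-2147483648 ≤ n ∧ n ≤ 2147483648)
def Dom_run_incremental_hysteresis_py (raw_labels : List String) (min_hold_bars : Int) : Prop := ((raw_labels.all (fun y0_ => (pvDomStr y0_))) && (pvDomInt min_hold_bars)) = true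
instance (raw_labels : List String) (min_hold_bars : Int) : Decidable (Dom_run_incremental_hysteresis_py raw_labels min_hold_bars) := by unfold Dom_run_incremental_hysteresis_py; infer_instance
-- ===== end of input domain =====

-- B differs from A only in decomposition (run-based vs per-element state machine); return values agree on Pre_.
-- ===== PORT A =====
-- the for-loop of A over indices 1..n-1, as structural recursion over the tail list;
-- state = (current_label, pending_label, pending_count), one output element per iteration
def pvALoop (m : Int) (xs : List String) (cur : String) (pend : Option String) (cnt : Int) : List String :=
  match xs with
  | [] => []
  | raw :: rest =>
    if raw = cur then
      cur :: pvALoop m rest cur none 0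
    else if some raw = pend then
      (if cnt + 1 ≥ m then raw :: pvALoop m rest raw none 0
       else cur :: pvALoop m rest cur pend (cnt + 1))
    else
      cur :: pvALoop m rest cur (some raw) 1

def run_incremental_hysteresis_py (raw_labels : List String) (min_hold_bars : Int) : List String :=
  if min_hold_bars ≤ 1 then raw_labels
  else match raw_labels with
    | [] => []   -- Python raises IndexError here; excluded by Pre_
    | h :: t => h :: pvALoop min_hold_bars t h none 0

-- ===== PORT B =====
-- Source B's outer while-loop: one recursive step per maximal run of equal labels
def pvBLoop (m : Int) (xs : List String) (cur : String) : List String :=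
  match xs with
  | [] => []
  | v :: rest =>
    let run := rest.takeWhile (· = v)
    let rest' := rest.dropWhile (· = v)
    let L := run.length + 1
    if v = cur then
      List.replicate L v ++ pvBLoop m rest' cur
    else if (L : Int) ≥ m then
      List.replicate (m - 1).toNat cur ++ List.replicate (L - (m - 1).toNat) v ++ pvBLoop m rest' v
    else
      List.replicate L cur ++ pvBLoop m rest' cur
termination_by xs.length
decreasing_by all_goals
  (simp only [List.length_cons];
   have := List.length_dropWhile_le (fun x => decide (x = v)) rest;
   omega)

def run_incremental_hysteresis_py_alt (raw_labels : List String) (min_hold_bars : Int) : List String :=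
  if min_hold_bars ≤ 1 then raw_labels
  else match raw_labels with
    | [] => []   -- Python raises IndexError here; excluded by Pre_
    | h :: _ => pvBLoop min_hold_bars raw_labels h

-- ===== PRECONDITION & SPEC =====
-- Pre_ excludes only the inputs where Python A raises: raw_labels = [] with min_hold_bars > 1 (IndexError at raw_labels[0]).
def Pre_run_incremental_hysteresis_py (raw_labels : List String) (min_hold_bars : Int) : Prop :=
  min_hold_bars ≤ 1 ∨ raw_labels ≠ []
instance (raw_labels : List String) (min_hold_bars : Int) : Decidable (Pre_run_incremental_hysteresis_py raw_labels min_hold_bars) := by unfold Pre_run_incremental_hysteresis_py; infer_instance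

def pvWitness_run_incremental_hysteresis_py : List String × Int := (["a", "b", "b", "b", "a"], 2)

def Spec_run_incremental_hysteresis_py (raw_labels : List String) (min_hold_bars : Int) (out : List String) : Prop := out = run_incremental_hysteresis_py_alt raw_labels min_hold_bars
instance (raw_labels : List String) (min_hold_bars : Int) (out : List String) : Decidable (Spec_run_incremental_hysteresis_py raw_labels min_hold_bars out) := by unfold Spec_run_incremental_hysteresis_py; infer_instance

-- ===== CLAIM (what is proved, stated in full; the proofs are below) =====
def Claim_equal_run_incremental_hysteresis_py : Prop := ∀ (raw_labels : List String) (min_hold_bars : Int), Dom_run_incremental_hysteresis_py raw_labels min_hold_bars → Pre_run_incremental_hysteresis_py raw_labels min_hold_bars → Spec_run_incremental_hysteresis_py raw_labels min_hold_bars (run_incremental_hysteresis_py raw_labels min_hold_bars)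

-- ===== LEMMAS AND PROOFS =====

-- the pending state is irrelevant when the next element is not the pending label
theorem pvALoop_pend_irrel (m : Int) (w : String) (rest : List String) (cur v : String) (c : Int)
    (hw : w ≠ v) :
    pvALoop m (w :: rest) cur (some v) c = pvALoop m (w :: rest) cur none 0 := by
  simp only [pvALoop]
  by_cases h1 : w = cur
  · simp [h1]
  · have h2 : ¬ (some w = some v) := by simp [hw]
    have h3 : ¬ (some w = (none : Option String)) := by simp
    rw [if_neg h1, if_neg h1, if_neg h2, if_neg h3]

-- a run equal to the current label is copied verbatim, resetting nothing
theorem pvALoop_same_run (m : Int) (k : Nat) (rest : List String) (cur : String) :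
    pvALoop m (List.replicate k cur ++ rest) cur none 0
      = List.replicate k cur ++ pvALoop m rest cur none 0 := by
  induction k with
  | zero => simp
  | succ k ih => simp [pvALoop, List.replicate_succ, ih]

-- processing a run of k copies of v ≠ cur with pending (v, c), 1 ≤ c < m,
-- followed by rest whose head is not v
theorem pvALoop_diff_run (m : Int) (v cur : String) (hv : v ≠ cur)
    (k : Nat) (c : Int) (hc : 1 ≤ c) (hcm : c < m)
    (rest : List String) (hrest : rest.head? ≠ some v) :
    pvALoop m (List.replicate k v ++ rest) cur (some v) c
      = if m ≤ c + k then
          List.replicate (m - 1 - c).toNat cur ++ List.replicate (k - (m - 1 - c).toNat) v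
            ++ pvALoop m rest v none 0
        else
          List.replicate k cur ++ pvALoop m rest cur none 0 := by
  induction k generalizing c with
  | zero =>
    have hnotm : ¬ m ≤ c + ((0 : Nat) : Int) := by push_cast; omega
    rw [if_neg hnotm]
    simp only [List.replicate_zero, List.nil_append]
    match rest, hrest with
    | [], _ => simp [pvALoop]
    | w :: rs, hr =>
      have hw : w ≠ v := by simpa using fun h => hr (by simp [h])
      exact pvALoop_pend_irrel m w rs cur v c hw
  | succ k ih =>
    rw [List.replicate_succ, List.cons_append]
    simp only [pvALoop]
    rw [if_neg hv]
    simp only [reduceIte]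
    by_cases hsw : c + 1 ≥ m
    · -- switch happens now: count reaches m at this element
      rw [if_pos hsw, pvALoop_same_run]
      have hm1 : m ≤ c + ((k + 1 : Nat) : Int) := by push_cast; omega
      rw [if_pos hm1]
      have ht : (m - 1 - c).toNat = 0 := by omega
      rw [ht]
      simp only [List.replicate_zero, List.nil_append, Nat.sub_zero]
      rw [List.replicate_succ, List.cons_append]
    · rw [if_neg hsw, ih (c + 1) (by omega) (by omega)]
      by_cases hm1 : m ≤ c + 1 + (k : Int)
      · rw [if_pos hm1]
        have hm2 : m ≤ c + ((k + 1 : Nat) : Int) := by push_cast; push_cast at hm1; omega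
        rw [if_pos hm2]
        have e1 : (m - 1 - c).toNat = (m - 1 - (c + 1)).toNat + 1 := by omega
        rw [e1]
        have e2 : (k + 1) - ((m - 1 - (c + 1)).toNat + 1) = k - (m - 1 - (c + 1)).toNat := by
          omega
        rw [e2, List.replicate_succ, List.cons_append]
        simp [List.append_assoc]
      · rw [if_neg hm1]
        have hm2 : ¬ m ≤ c + ((k + 1 : Nat) : Int) := by push_cast; push_cast at hm1; omega
        rw [if_neg hm2, List.replicate_succ, List.cons_append]

-- a maximal (· = v) run is a replicate of v
theorem pvTakeWhile_replicate (v : String) (l : List String) :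
    l.takeWhile (· = v) = List.replicate (l.takeWhile (· = v)).length v := by
  apply List.eq_replicate_of_mem
  intro b hb
  have := List.mem_takeWhile_imp hb
  simpa using this

-- after dropping the (· = v) run, the next element is not v
theorem pvDropWhile_head (v : String) (l : List String) :
    (l.dropWhile (· = v)).head? ≠ some v := by
  induction l with
  | nil => simp
  | cons x xs ih =>
    by_cases hx : x = v
    · simpa [List.dropWhile_cons, hx] using ih
    · simp [hx]

-- the central equivalence of the two loops (for m ≥ 2)
theorem pvLoop_eq (m : Int) (hm : 2 ≤ m) (xs : List String) (cur : String) :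
    pvALoop m xs cur none 0 = pvBLoop m xs cur := by
  match xs with
  | [] => simp [pvALoop, pvBLoop]
  | v :: rest =>
    have hsplit : rest = rest.takeWhile (· = v) ++ rest.dropWhile (· = v) :=
      (List.takeWhile_append_dropWhile).symm
    have hrep : rest.takeWhile (· = v)
        = List.replicate (rest.takeWhile (· = v)).length v := pvTakeWhile_replicate v rest
    have hhead := pvDropWhile_head v rest
    have hlt : (rest.dropWhile (· = v)).length < (v :: rest).length := by
      have := List.length_dropWhile_le (fun x => decide (x = v)) rest
      simp only [List.length_cons]; omega
    rw [pvBLoop]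
    by_cases hvc : v = cur
    · subst hvc
      rw [if_pos rfl]
      simp only [pvALoop, reduceIte]
      conv_lhs => rw [hsplit, hrep]
      rw [pvALoop_same_run, pvLoop_eq m hm (rest.dropWhile (· = v)) v,
        List.replicate_succ, List.cons_append]
    · rw [if_neg hvc]
      simp only [pvALoop]
      rw [if_neg hvc]
      have hns : ¬ (some v = (none : Option String)) := by simp
      rw [if_neg hns]
      conv_lhs => rw [hsplit, hrep]
      rw [pvALoop_diff_run m v cur hvc _ 1 (by omega) (by omega) _ hhead]
      by_cases hm2 : m ≤ 1 + ((rest.takeWhile (· = v)).length : Int)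
      · rw [if_pos hm2]
        have hge : (((rest.takeWhile (· = v)).length + 1 : Nat) : Int) ≥ m := by
          push_cast; push_cast at hm2; omega
        rw [if_pos hge, pvLoop_eq m hm (rest.dropWhile (· = v)) v]
        have e1 : (m - 1).toNat = (m - 1 - 1).toNat + 1 := by omega
        rw [e1]
        have e2 : (rest.takeWhile (· = v)).length + 1 - ((m - 1 - 1).toNat + 1)
            = (rest.takeWhile (· = v)).length - (m - 1 - 1).toNat := by omega
        rw [e2, List.replicate_succ, List.cons_append]
        simp [List.append_assoc]
      · rw [if_neg hm2]
        have hge : ¬ (((rest.takeWhile (· = v)).length + 1 : Nat) : Int) ≥ m := by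
          push_cast; push_cast at hm2; omega
        rw [if_neg hge, pvLoop_eq m hm (rest.dropWhile (· = v)) cur,
          List.replicate_succ, List.cons_append]
termination_by xs.length
decreasing_by all_goals exact hlt

-- ===== VERDICT (by name: the statement is the Claim_ definition above) =====
theorem run_incremental_hysteresis_py_spec : Claim_equal_run_incremental_hysteresis_py := by
  intro raw_labels min_hold_bars _ hpre
  unfold Spec_run_incremental_hysteresis_py
  unfold run_incremental_hysteresis_py run_incremental_hysteresis_py_alt
  by_cases hm : min_hold_bars ≤ 1
  · rw [if_pos hm, if_pos hm]
  · rw [if_neg hm, if_neg hm]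
    match raw_labels, hpre with
    | [], hpre => exact absurd rfl (hpre.resolve_left hm)
    | h :: t, _ =>
      have hm2 : 2 ≤ min_hold_bars := by omega
      have hmain := pvLoop_eq min_hold_bars hm2 (h :: t) h
      simp only [pvALoop, reduceIte] at hmain
      exact hmain
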